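-- pv_equiv track=rewrite | github.com/dengkliu/algorithms | find_peak-element_II.py | __find_local_max
-- ===== SOURCE A (Python) =====
-- def __find_local_max(row):
--     start, end = 0, len(row)-1
--
--     while start + 1 < end:
--         mid = (start + end)//2
--         if row[mid] < row[mid-1]:
--             end = mid
--         else:
--             start = mid
--
--     return start if row[start] > row[end] else end
-- ===== SOURCE B (Python) =====
-- def __find_local_max(row):
--     # One bisection step on a (start, end) state; identity once the interval
--     # is down to two (or fewer) indices, so extra applications are harmless.
--     def step(st):
--         start, end = st
--         if start + 1 >= end:
--             return st
--         mid = (start + end) // 2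
--         return (start, mid) if row[mid] < row[mid - 1] else (mid, end)
--
--     st = (0, len(row) - 1)
--     for _ in range(len(row)):   # len(row) applications are always enough fuel
--         st = step(st)
--     start, end = st
--     return end if row[end] >= row[start] else start
-- ===== Notes on version B (the rewrite author's own statement) =====
-- stated objective: alternative
-- what changed: The condition-driven while loop is replaced by a pure one-step bisection function (identity on terminal states) applied a fixed len(row) times as fuel via a for-loop over a tuple state, with the final endpoint comparison inverted (end if row[end] >= row[start]).
import Mathlib
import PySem

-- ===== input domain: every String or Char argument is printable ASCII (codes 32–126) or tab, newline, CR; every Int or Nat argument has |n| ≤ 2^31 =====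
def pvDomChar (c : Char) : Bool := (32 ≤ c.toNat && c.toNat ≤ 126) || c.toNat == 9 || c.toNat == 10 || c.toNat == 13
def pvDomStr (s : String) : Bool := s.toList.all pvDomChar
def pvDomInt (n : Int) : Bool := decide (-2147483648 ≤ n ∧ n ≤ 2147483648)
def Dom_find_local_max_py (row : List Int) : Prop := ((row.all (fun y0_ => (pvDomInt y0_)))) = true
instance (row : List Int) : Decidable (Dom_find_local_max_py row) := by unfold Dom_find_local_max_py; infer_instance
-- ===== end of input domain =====

-- B replaces A's condition-driven while loop by a fixed number (len(row)) of
-- applications of a pure one-step bisection function (identity on terminal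
-- states); equivalence is about the return value, for nonempty rows
-- (A raises IndexError on []).


-- ===== PORT A =====
-- the while-loop of A: state (start, end); indices are in range for row ≠ [],
-- so row[i] is ported as pyGetD with default 0 (never hit under Pre_)
def pvLoopA (row : List Int) (start e : Int) : Int × Int :=
  if h : start + 1 < e then
    let mid := PySem.Int.floordiv (start + e) 2
    if PySem.List.pyGetD row mid 0 < PySem.List.pyGetD row (mid - 1) 0 then
      pvLoopA row start mid
    else
      pvLoopA row mid e
  else
    (start, e)
termination_by (e - start).toNat
decreasing_by
  all_goals
    rw [PySem.Int.floordiv_eq_ediv_of_pos (by omega : (0:Int) < 2)]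
    omega

def find_local_max_py (row : List Int) : Int :=
  let p := pvLoopA row 0 ((row.length : Int) - 1)
  if PySem.List.pyGetD row p.1 0 > PySem.List.pyGetD row p.2 0 then p.1 else p.2

-- ===== PORT B =====
-- B's pure one-step bisection function
def pvStepB (row : List Int) (st : Int × Int) : Int × Int :=
  if st.1 + 1 ≥ st.2 then st
  else
    let mid := PySem.Int.floordiv (st.1 + st.2) 2
    if PySem.List.pyGetD row mid 0 < PySem.List.pyGetD row (mid - 1) 0 then
      (st.1, mid)
    else
      (mid, st.2)

-- the for-loop over range(len(row)) applying step, then the final comparison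
def find_local_max_py_alt (row : List Int) : Int :=
  let st := (List.range row.length).foldl (fun st _ => pvStepB row st)
              (0, (row.length : Int) - 1)
  if PySem.List.pyGetD row st.2 0 ≥ PySem.List.pyGetD row st.1 0 then st.2 else st.1

-- ===== PRECONDITION & SPEC =====
-- A raises IndexError on the empty list (row[0] with start=0, end=-1); excluded.
def Pre_find_local_max_py (row : List Int) : Prop := row ≠ []
instance (row : List Int) : Decidable (Pre_find_local_max_py row) := by unfold Pre_find_local_max_py; infer_instance
def pvWitness_find_local_max_py : List Int := ([1, 3, 2])

def Spec_find_local_max_py (row : List Int) (out : Int) : Prop := out = find_local_max_py_alt row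
instance (row : List Int) (out : Int) : Decidable (Spec_find_local_max_py row out) := by unfold Spec_find_local_max_py; infer_instance

-- ===== CLAIM (what is proved, stated in full; the proofs are below) =====
def Claim_equal_find_local_max_py : Prop := ∀ (row : List Int), Dom_find_local_max_py row → Pre_find_local_max_py row → Spec_find_local_max_py row (find_local_max_py row)

-- ===== LEMMAS AND PROOFS =====

-- k iterations of B's step reach A's loop result whenever k+1 bounds the interval length
theorem pvStepB_iter_eq (row : List Int) :
    ∀ (k : ℕ) (s e : Int), (e - s).toNat ≤ k + 1 →
      (pvStepB row)^[k] (s, e) = pvLoopA row s e := by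
  intro k
  induction k with
  | zero =>
    intro s e hk
    rw [Function.iterate_zero_apply, pvLoopA, dif_neg (by omega)]
  | succ k ih =>
    intro s e hk
    rw [Function.iterate_succ_apply]
    by_cases h : s + 1 < e
    · have hmid : s < PySem.Int.floordiv (s + e) 2 ∧ PySem.Int.floordiv (s + e) 2 < e := by
        rw [PySem.Int.floordiv_eq_ediv_of_pos (by omega : (0:Int) < 2)]
        omega
      rw [pvStepB, if_neg (by simp; omega), pvLoopA, dif_pos h]
      simp only
      split
      · exact ih s _ (by omega)
      · exact ih _ e (by omega)
    · have hfix : pvStepB row (s, e) = (s, e) := by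
        rw [pvStepB, if_pos (by simp; omega)]
      rw [hfix]
      exact ih s e (by omega)

-- foldl over List.range with a constant-in-index function is iteration
theorem foldl_range_iterate {α : Type} (f : α → α) (n : ℕ) (a : α) :
    (List.range n).foldl (fun st _ => f st) a = f^[n] a := by
  induction n generalizing a with
  | zero => simp
  | succ n ih =>
    rw [List.range_succ, List.foldl_append, ih, List.foldl_cons, List.foldl_nil,
      Function.iterate_succ_apply']

-- ===== VERDICT (by name: the statement is the Claim_ definition above) =====
theorem find_local_max_py_spec : Claim_equal_find_local_max_py := by
  intro row _ hpre
  unfold Spec_find_local_max_py find_local_max_py find_local_max_py_alt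
  have hn : 1 ≤ row.length := List.length_pos_iff.mpr hpre
  rw [foldl_range_iterate,
    pvStepB_iter_eq row row.length 0 ((row.length : Int) - 1) (by omega)]
  set p := pvLoopA row 0 ((row.length : Int) - 1)
  rcases le_or_gt (PySem.List.pyGetD row p.1 0) (PySem.List.pyGetD row p.2 0) with h | h
  · rw [if_neg (by omega), if_pos h]
  · rw [if_pos h, if_neg (by omega)]
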